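-- pv_equiv track=rewrite | github.com/hoangm90/Diplomova-Prace | fastapi_microservice/planning.py | sort_lessons
-- ===== SOURCE A (Python) =====
-- def sort_lessons(lessons_raw):
--     colors = []
--     max_color = -1
--     for lesson in lessons_raw:
--         if lesson['color'] > max_color:
--             max_color = lesson['color']
--
--     for i in range(max_color + 1):
--         colors.append([])
--
--     for lesson in lessons_raw:
--         colors[lesson['color']].append(lesson)
--
--     return colors
-- ===== SOURCE B (Python) =====
-- def sort_lessons(lessons_raw):
--     max_color = max((lesson['color'] for lesson in lessons_raw), default=-1)
--     return [[lesson for lesson in lessons_raw if lesson['color'] == i]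
--             for i in range(max_color + 1)]
-- ===== Notes on version B (the rewrite author's own statement) =====
-- stated objective: simpler
-- what changed: Instead of preallocating max_color+1 empty buckets and distributing each lesson into its bucket by mutable list indexing, B computes the maximum color with built-in max and builds each bucket directly as a filter comprehension selecting the lessons of that color, one bucket per color.
import Mathlib
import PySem

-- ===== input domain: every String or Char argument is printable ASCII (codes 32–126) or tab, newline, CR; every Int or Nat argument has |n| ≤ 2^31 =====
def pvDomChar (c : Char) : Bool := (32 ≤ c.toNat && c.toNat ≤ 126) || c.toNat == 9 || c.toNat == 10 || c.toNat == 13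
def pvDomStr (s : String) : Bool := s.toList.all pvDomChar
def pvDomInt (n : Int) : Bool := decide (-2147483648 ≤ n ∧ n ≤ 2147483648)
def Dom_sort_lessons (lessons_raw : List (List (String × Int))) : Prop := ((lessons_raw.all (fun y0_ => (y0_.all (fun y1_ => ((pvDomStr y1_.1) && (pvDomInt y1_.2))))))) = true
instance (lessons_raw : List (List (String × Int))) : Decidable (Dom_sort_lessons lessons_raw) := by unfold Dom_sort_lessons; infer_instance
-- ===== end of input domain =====

-- B replaces A's preallocate-then-distribute-by-index with max() plus one filter
-- comprehension per color (simpler; no speed claim).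

-- ===== PORT A =====
-- lesson['color'] : first match in the association list (KeyError = none)
def pvColor (lesson : List (String × Int)) : Option Int :=
  PySem.Dict.get? (PySem.Dict.mk lesson) "color"

def sort_lessons (lessons_raw : List (List (String × Int))) : List (List (List (String × Int))) :=
  let max_color : Int := lessons_raw.foldl (fun max_color lesson =>
      match pvColor lesson with
      | some c => if c > max_color then c else max_color
      | none => max_color) (-1)
  let colors : List (List (List (String × Int))) :=
    (PySem.List.pyRange 0 (max_color + 1) 1).foldl (fun colors _ => colors ++ [[]]) []
  lessons_raw.foldl (fun colors lesson =>
      match pvColor lesson with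
      | some c => PySem.List.pySetD colors c (PySem.List.pyGetD colors c [] ++ [lesson])
      | none => colors) colors

-- ===== PORT B =====
-- max(generator, default=-1) ported via PySem.List.max? on the colors that exist
def sort_lessons_alt (lessons_raw : List (List (String × Int))) : List (List (List (String × Int))) :=
  let max_color : Int :=
    match PySem.List.max? (lessons_raw.filterMap pvColor) (fun y => y) with
    | some m => m
    | none => -1
  (PySem.List.pyRange 0 (max_color + 1) 1).map (fun i =>
    lessons_raw.filter (fun lesson => pvColor lesson == some i))

-- ===== PRECONDITION & SPEC =====
-- Pre_ excludes lessons with a missing 'color' key (A raises KeyError) and lessons with a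
-- negative color: there A either raises IndexError or files the lesson by Python's
-- negative-index wraparound into the bucket len+c — a corner neither behaviour was specified
-- for (B simply leaves negative colors out of the gathered 0..max_color buckets).
def Pre_sort_lessons (lessons_raw : List (List (String × Int))) : Prop :=
  ∀ lesson ∈ lessons_raw, 0 ≤ (pvColor lesson).getD (-1)
instance (lessons_raw : List (List (String × Int))) : Decidable (Pre_sort_lessons lessons_raw) := by unfold Pre_sort_lessons; infer_instance

def pvWitness_sort_lessons : (List (List (String × Int))) := [[("color", 1)], [("color", 0), ("room", 7)]]

def Spec_sort_lessons (lessons_raw : List (List (String × Int))) (out : List (List (List (String × Int)))) : Prop := out = sort_lessons_alt lessons_raw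
instance (lessons_raw : List (List (String × Int))) (out : List (List (List (String × Int)))) : Decidable (Spec_sort_lessons lessons_raw out) := by unfold Spec_sort_lessons; infer_instance

-- ===== CLAIM (what is proved, stated in full; the proofs are below) =====
def Claim_equal_sort_lessons : Prop := ∀ (lessons_raw : List (List (String × Int))), Dom_sort_lessons lessons_raw → Pre_sort_lessons lessons_raw → Spec_sort_lessons lessons_raw (sort_lessons lessons_raw)

-- ===== LEMMAS AND PROOFS =====

-- A's running-maximum loop is the fold of `max` over the colors that exist.
lemma pv_foldMax_eq (xs : List (List (String × Int))) : ∀ (m : Int),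
    xs.foldl (fun max_color lesson =>
      match pvColor lesson with
      | some c => if c > max_color then c else max_color
      | none => max_color) m
    = (xs.filterMap pvColor).foldl max m := by
  induction xs with
  | nil => intro m; rfl
  | cons x xs ih =>
    intro m
    simp only [List.foldl_cons, List.filterMap_cons]
    cases h : pvColor x with
    | none => simp only [h]; exact ih m
    | some c =>
      simp only [h, List.foldl_cons]
      have : (if c > m then c else m) = max m c := by omega
      rw [this]; exact ih _

-- the seed of A's max loop never decreases …
lemma pv_le_foldMax (xs : List (List (String × Int))) (m : Int) :
    m ≤ xs.foldl (fun max_color lesson =>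
      match pvColor lesson with
      | some c => if c > max_color then c else max_color
      | none => max_color) m := by
  induction xs generalizing m with
  | nil => simp
  | cons x xs ih =>
    simp only [List.foldl_cons]
    cases h : pvColor x with
    | none => simpa only [h] using ih m
    | some c =>
      simp only [h]
      split_ifs with hc
      · exact le_trans (le_of_lt hc) (ih c)
      · exact ih m

-- … and every color occurring in the list is ≤ the loop's result.
lemma pv_color_le_foldMax (xs : List (List (String × Int))) : ∀ (m : Int),
    ∀ l ∈ xs, ∀ c : Int, pvColor l = some c →
    c ≤ xs.foldl (fun max_color lesson =>
      match pvColor lesson with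
      | some c => if c > max_color then c else max_color
      | none => max_color) m := by
  induction xs with
  | nil => intro m l hl; cases hl
  | cons x xs ih =>
    intro m l hl c hc
    simp only [List.foldl_cons]
    cases h : pvColor x with
    | none =>
      simp only [h]
      rcases List.mem_cons.mp hl with rfl | hl'
      · rw [h] at hc; cases hc
      · exact ih m l hl' c hc
    | some c' =>
      simp only [h]
      rcases List.mem_cons.mp hl with rfl | hl'
      · rw [h] at hc; injection hc with e; subst e
        split_ifs with hgt
        · exact pv_le_foldMax xs _
        · exact le_trans (by omega) (pv_le_foldMax xs m)
      · exact ih _ l hl' c hc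

-- B's `max(…, default=-1)` equals A's loop when every color is ≥ 0.
lemma pv_max_eq (xs : List (List (String × Int)))
    (hpre : ∀ l ∈ xs, 0 ≤ (pvColor l).getD (-1)) :
    (match PySem.List.max? (xs.filterMap pvColor) (fun y => y) with
     | some m => m
     | none => (-1 : Int))
    = xs.foldl (fun max_color lesson =>
      match pvColor lesson with
      | some c => if c > max_color then c else max_color
      | none => max_color) (-1) := by
  rw [pv_foldMax_eq]
  cases hcs : xs.filterMap pvColor with
  | nil => simp [hcs, PySem.List.max?]
  | cons c t =>
    have hc0 : (0:Int) ≤ c := by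
      have hm : c ∈ xs.filterMap pvColor := by rw [hcs]; exact List.mem_cons_self ..
      obtain ⟨l, hl, hcl⟩ := List.mem_filterMap.mp hm
      have := hpre l hl; rw [hcl] at this; simpa using this
    rw [PySem.List.max?_id_cons]
    simp only [List.foldl_cons]
    have : max (-1 : Int) c = c := by omega
    rw [this]

-- A's distribution loop: length is preserved …
lemma pv_len_foldA (xs : List (List (String × Int))) : ∀ (cols : List (List (List (String × Int)))),
    (xs.foldl (fun colors lesson =>
      match pvColor lesson with
      | some c => PySem.List.pySetD colors c (PySem.List.pyGetD colors c [] ++ [lesson])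
      | none => colors) cols).length = cols.length := by
  induction xs with
  | nil => intro cols; rfl
  | cons x xs ih =>
    intro cols
    simp only [List.foldl_cons]
    cases h : pvColor x with
    | none => simpa only [h] using ih cols
    | some c => simp only [h]; rw [ih, PySem.List.length_pySetD]

-- … and bucket n collects exactly the lessons of color n, in order.
lemma pv_get_foldA (xs : List (List (String × Int))) : ∀ (cols : List (List (List (String × Int)))),
    (∀ l ∈ xs, ∃ c, pvColor l = some c ∧ 0 ≤ c ∧ c < (cols.length : Int)) →
    ∀ (n : Nat) (hn : n < cols.length),
    (xs.foldl (fun colors lesson =>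
      match pvColor lesson with
      | some c => PySem.List.pySetD colors c (PySem.List.pyGetD colors c [] ++ [lesson])
      | none => colors) cols)[n]?
    = some (cols[n]'hn ++ xs.filter (fun l => pvColor l == some (n : Int))) := by
  induction xs with
  | nil => intro cols _ n hn; simp [List.getElem?_eq_getElem hn]
  | cons x xs ih =>
    intro cols hx n hn
    obtain ⟨c, hc, hc0, hclt⟩ := hx x (List.mem_cons_self ..)
    simp only [List.foldl_cons, hc]
    have hset : PySem.List.pySetD cols c (PySem.List.pyGetD cols c [] ++ [x])
        = cols.set c.toNat (cols[c.toNat]'(by omega) ++ [x]) := by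
      rw [PySem.List.pySetD_of_nonneg cols _ hc0,
          PySem.List.pyGetD_eq_getElem cols [] hc0 hclt]
    rw [hset, ih (cols.set c.toNat (cols[c.toNat]'(by omega) ++ [x]))
          (by intro l hl; simpa using hx l (List.mem_cons_of_mem _ hl))
          n (by simpa using hn)]
    by_cases hnc : n = c.toNat
    · subst hnc
      rw [List.getElem_set_self]
      have hb : (pvColor x == some (c.toNat : Int)) = true := by
        rw [hc]; simp; omega
      simp only [List.filter_cons, hb, if_true]
      simp [List.append_assoc]
    · rw [List.getElem_set_ne (by omega)]
      have hb : (pvColor x == some (n : Int)) = false := by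
        rw [hc]; simp; omega
      simp only [List.filter_cons, hb, Bool.false_eq_true, if_false]

-- ===== VERDICT (by name: the statement is the Claim_ definition above) =====
theorem sort_lessons_spec : Claim_equal_sort_lessons := by
  intro lr _ hpre
  unfold Spec_sort_lessons sort_lessons sort_lessons_alt
  simp only
  set M : Int := lr.foldl (fun max_color lesson =>
      match pvColor lesson with
      | some c => if c > max_color then c else max_color
      | none => max_color) (-1) with hM
  have hM1 : -1 ≤ M := pv_le_foldMax lr (-1)
  have hcol : ∀ l ∈ lr, ∃ c, pvColor l = some c ∧ 0 ≤ c ∧ c ≤ M := by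
    intro l hl
    have hp := hpre l hl
    cases hc : pvColor l with
    | none => rw [hc] at hp; simp at hp
    | some c =>
      rw [hc] at hp; simp at hp
      exact ⟨c, rfl, hp, pv_color_le_foldMax lr (-1) l hl c hc⟩
  have hcols0 : (PySem.List.pyRange 0 (M + 1) 1).foldl
      (fun (colors : List (List (List (String × Int)))) _ => colors ++ [[]]) []
      = List.replicate (M + 1).toNat [] := by
    rw [show (fun (colors : List (List (List (String × Int)))) (_ : Int) => colors ++ [[]])
          = fun colors x => colors ++ [(fun _ => ([] : List (List (String × Int)))) x] from rfl,
        PySem.List.foldl_append_singleton_eq_map]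
    simp [List.map_const', PySem.List.length_pyRange_one]
  rw [hcols0, pv_max_eq lr hpre, ← hM]
  apply List.ext_getElem?
  intro n
  by_cases hn : n < (M + 1).toNat
  · rw [pv_get_foldA lr (List.replicate (M + 1).toNat []) (by
        intro l hl
        obtain ⟨c, hc, h0, hle⟩ := hcol l hl
        refine ⟨c, hc, h0, ?_⟩
        rw [List.length_replicate]
        omega)
      n (by simpa using hn)]
    have hn' : n < (M + 1 - 0).toNat := by omega
    rw [PySem.List.pyRange_one, List.getElem?_map, List.getElem?_map,
        List.getElem?_range hn']
    simp only [Option.map_some, List.getElem_replicate]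
    simp
  · rw [List.getElem?_eq_none (by rw [pv_len_foldA, List.length_replicate]; omega),
        List.getElem?_eq_none (by
          rw [List.length_map, PySem.List.length_pyRange_one]; omega)]
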